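-- pv_equiv track=rewrite | github.com/abrignoni/RLEAPP | scripts/artifacts/snapIPd.py | clean_and_group_data
-- ===== SOURCE A (Python) =====
-- def clean_and_group_data(input_data):
--     # Split the input data into lines
--     lines = input_data.split('\n')
--
--     # Initialize variables to track whether we are in a section to exclude
--     exclude = False
--     grouped_data = []
--     current_section = []
--
--     for line in lines:
--         # Check if the line contains dashes or equal signs
--         if line.startswith('---') or line.startswith('==='):
--             exclude = not exclude
--             if not exclude:
--                 # End of an excluded section, start a new section
--                 if current_section:
--                     grouped_data.append(current_section)
--                     current_section = []
--             continue
--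
--         # Add the line to current_section if we are not in an excluded section
--         if not exclude and line.strip():
--             current_section.append(line.strip())
--
--     # Add the last section to the grouped data if it exists
--     if current_section:
--         grouped_data.append(current_section)
--
--     return grouped_data
-- ===== SOURCE B (Python) =====
-- def clean_and_group_data(input_data):
--     # Partition lines into chunks separated by delimiter lines, then keep only
--     # the even-indexed chunks (the non-excluded regions), cleaned.
--     done = []
--     cur = []
--     for line in input_data.split('\n'):
--         if line.startswith('---') or line.startswith('==='):
--             done.append(cur)
--             cur = []
--         else:
--             cur.append(line)
--     done.append(cur)
--     grouped = []
--     for i, chunk in enumerate(done):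
--         if i % 2 == 0:
--             section = [l.strip() for l in chunk if l.strip()]
--             if section:
--                 grouped.append(section)
--     return grouped
-- ===== Notes on version B (the rewrite author's own statement) =====
-- stated objective: alternative
-- what changed: Replaces A's running exclude-toggle with conditional flushes by a two-phase pass: partition the lines into chunks at delimiter lines, then keep the cleaned non-empty even-indexed chunks (the non-excluded regions).
import Mathlib
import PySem

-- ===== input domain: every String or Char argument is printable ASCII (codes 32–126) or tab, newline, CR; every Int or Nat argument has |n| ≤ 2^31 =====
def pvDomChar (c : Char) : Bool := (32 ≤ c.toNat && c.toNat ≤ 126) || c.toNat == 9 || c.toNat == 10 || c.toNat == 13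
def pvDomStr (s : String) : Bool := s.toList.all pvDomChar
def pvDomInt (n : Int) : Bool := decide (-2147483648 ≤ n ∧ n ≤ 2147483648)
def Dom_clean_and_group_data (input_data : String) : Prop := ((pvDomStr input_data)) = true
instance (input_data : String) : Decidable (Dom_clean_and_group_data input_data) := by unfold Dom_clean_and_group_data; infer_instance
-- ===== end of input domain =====

-- B replaces A's running exclude-toggle/flush accumulator by a partition-into-chunks pass
-- followed by selecting the even-indexed chunks (objective: simpler decomposition, same cost).

-- shared delimiter predicate: line.startswith('---') or line.startswith('===')
def pvDelim (line : String) : Bool :=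
  PySem.Str.startswith line "---" || PySem.Str.startswith line "==="

-- [l.strip() for l in chunk if l.strip()]
def pvClean (c : List String) : List String :=
  (c.filter (fun l => PySem.Str.strip l ≠ "")).map PySem.Str.strip

-- ===== PORT A =====
-- loop body of A's for-loop, state = (exclude, grouped_data, current_section)
def pvStepA (st : Bool × List (List String) × List String) (line : String) :
    Bool × List (List String) × List String :=
  let ex := st.1; let gd := st.2.1; let cs := st.2.2
  if pvDelim line then
    let ex' := !ex
    if !ex' then
      if cs ≠ [] then (ex', gd ++ [cs], ([] : List String)) else (ex', gd, cs)
    else (ex', gd, cs)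
  else
    if !ex && PySem.Str.strip line ≠ "" then (ex, gd, cs ++ [PySem.Str.strip line])
    else (ex, gd, cs)

-- input_data.split('\n'): the separator is the non-empty literal "\n", so split? is always `some`
def clean_and_group_data (input_data : String) : List (List String) :=
  let lines := (PySem.Str.split? input_data "\n").getD []
  let st := lines.foldl pvStepA (false, [], [])
  if st.2.2 ≠ [] then st.2.1 ++ [st.2.2] else st.2.1

-- ===== PORT B =====
-- phase 1 of B: partition lines into chunks at delimiter lines; state = (done chunks, current chunk)
def pvStepB1 (st : List (List String) × List String) (line : String) :
    List (List String) × List String :=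
  if pvDelim line then (st.1 ++ [st.2], ([] : List String)) else (st.1, st.2 ++ [line])

-- phase 2 of B: keep cleaned non-empty even-indexed chunks
def pvStepB2 (grouped : List (List String)) (ic : Int × List String) : List (List String) :=
  if PySem.Int.mod ic.1 2 == 0 then
    if pvClean ic.2 = [] then grouped else grouped ++ [pvClean ic.2]
  else grouped

def clean_and_group_data_alt (input_data : String) : List (List String) :=
  let lines := (PySem.Str.split? input_data "\n").getD []
  let st := lines.foldl pvStepB1 ([], [])
  let done := st.1 ++ [st.2]
  (PySem.List.enumerate done 0).foldl pvStepB2 []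

-- ===== PRECONDITION & SPEC =====
def Spec_clean_and_group_data (input_data : String) (out : List (List String)) : Prop := out = clean_and_group_data_alt input_data
instance (input_data : String) (out : List (List String)) : Decidable (Spec_clean_and_group_data input_data out) := by unfold Spec_clean_and_group_data; infer_instance

-- ===== CLAIM (what is proved, stated in full; the proofs are below) =====
def Claim_equal_clean_and_group_data : Prop := ∀ (input_data : String), Dom_clean_and_group_data input_data → Spec_clean_and_group_data input_data (clean_and_group_data input_data)

-- ===== LEMMAS AND PROOFS =====

def pvEmit (cur : List String) : List (List String) := if cur = [] then [] else [cur]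

-- the chunk partition of a line list (always nonempty)
def pvChunks : List String → List (List String)
  | [] => [[]]
  | l :: rest =>
    if pvDelim l then [] :: pvChunks rest
    else match pvChunks rest with
      | c :: cs => (l :: c) :: cs
      | [] => [[l]]

-- groups produced from a chunk list starting in included (pvGIn') / excluded (pvGEx') phase
mutual
def pvGIn' (cur : List String) : List (List String) → List (List String)
  | [] => pvEmit cur
  | c :: cs => pvEmit (cur ++ pvClean c) ++ pvGEx' cs
def pvGEx' : List (List String) → List (List String)
  | [] => []
  | _ :: cs => pvGIn' [] cs
end

theorem pvChunks_ne_nil (lines : List String) : pvChunks lines ≠ [] := by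
  cases lines with
  | nil => simp [pvChunks]
  | cons l rest =>
    simp only [pvChunks]
    split
    · simp
    · split <;> simp_all

-- A's loop computes the chunk-phase groups
theorem lemA (lines : List String) : ∀ (ex : Bool) (gd : List (List String)) (cur : List String),
    (if (lines.foldl pvStepA (ex, gd, cur)).2.2 ≠ [] then
        (lines.foldl pvStepA (ex, gd, cur)).2.1 ++ [(lines.foldl pvStepA (ex, gd, cur)).2.2]
      else (lines.foldl pvStepA (ex, gd, cur)).2.1)
    = gd ++ (if ex then pvEmit cur ++ pvGEx' (pvChunks lines) else pvGIn' cur (pvChunks lines)) := by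
  induction lines with
  | nil =>
    intro ex gd cur
    cases ex <;> simp only [List.foldl_nil, pvChunks, pvGIn', pvGEx', pvEmit, pvClean] <;>
      split <;> simp_all
  | cons l rest ih =>
    intro ex gd cur
    by_cases hd : pvDelim l = true
    · cases ex with
      | false =>
        rw [List.foldl_cons, show pvStepA (false, gd, cur) l = (true, gd, cur) by
              simp [pvStepA, hd], ih]
        simp only [pvChunks, hd, if_pos]
        cases hc : pvChunks rest with
        | nil => exact absurd hc (pvChunks_ne_nil rest)
        | cons c cs =>
          simp [pvGIn', pvGEx', pvClean, pvEmit]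
      | true =>
        rw [List.foldl_cons,
          show pvStepA (true, gd, cur) l = (false, gd ++ pvEmit cur, []) by
            by_cases hc : cur = [] <;> simp [pvStepA, hd, pvEmit, hc], ih]
        simp [pvChunks, hd, pvGEx', pvEmit, List.append_assoc]
    · cases ex with
      | true =>
        rw [List.foldl_cons, show pvStepA (true, gd, cur) l = (true, gd, cur) by
              simp [pvStepA, hd], ih]
        simp only [pvChunks, hd, if_neg, Bool.false_eq_true, not_false_iff]
        cases hc : pvChunks rest with
        | nil => exact absurd hc (pvChunks_ne_nil rest)
        | cons c cs => simp [pvGEx']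
      | false =>
        rw [List.foldl_cons,
          show pvStepA (false, gd, cur) l
              = (false, gd, cur ++ if PySem.Str.strip l ≠ "" then [PySem.Str.strip l] else []) by
            by_cases hs : PySem.Str.strip l = "" <;> simp [pvStepA, hd, hs], ih]
        simp only [pvChunks, hd, if_neg, Bool.false_eq_true, not_false_iff]
        cases hc : pvChunks rest with
        | nil => exact absurd hc (pvChunks_ne_nil rest)
        | cons c cs =>
          have hcl : pvClean (l :: c)
              = (if PySem.Str.strip l ≠ "" then [PySem.Str.strip l] else []) ++ pvClean c := by
            by_cases hs : PySem.Str.strip l = "" <;> simp [pvClean, hs]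
          simp [pvGIn', hcl, List.append_assoc]

-- phase 1 of B computes pvChunks
theorem lemB1 (lines : List String) :
    ∀ (done : List (List String)) (cur : List String),
    (lines.foldl pvStepB1 (done, cur)).1 ++ [(lines.foldl pvStepB1 (done, cur)).2]
    = done ++ (match pvChunks lines with
               | c :: cs => (cur ++ c) :: cs
               | [] => [cur]) := by
  induction lines with
  | nil => intro done cur; simp [pvChunks]
  | cons l rest ih =>
    intro done cur
    by_cases hd : pvDelim l = true
    · rw [List.foldl_cons, show pvStepB1 (done, cur) l = (done ++ [cur], []) by
            simp [pvStepB1, hd], ih]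
      simp only [pvChunks, hd, if_pos]
      cases hc : pvChunks rest with
      | nil => exact absurd hc (pvChunks_ne_nil rest)
      | cons c cs => simp
    · rw [List.foldl_cons, show pvStepB1 (done, cur) l = (done, cur ++ [l]) by
            simp [pvStepB1, hd], ih]
      simp only [pvChunks, hd, if_neg, Bool.false_eq_true, not_false_iff]
      cases hc : pvChunks rest with
      | nil => exact absurd hc (pvChunks_ne_nil rest)
      | cons c cs => simp

-- phase 2 of B over an enumeration starting at a nonnegative even/odd index
theorem lemB2 (cs : List (List String)) :
    ∀ (i : Int), 0 ≤ i → ∀ (acc : List (List String)),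
    (PySem.List.enumerate cs i).foldl pvStepB2 acc
    = acc ++ (if PySem.Int.mod i 2 = 0 then pvGIn' [] cs else pvGEx' cs) := by
  induction cs with
  | nil =>
    intro i hi acc
    simp only [PySem.List.enumerate_nil, List.foldl_nil, pvGIn', pvGEx', pvEmit]
    split <;> simp
  | cons c cs ih =>
    intro i hi acc
    rw [PySem.List.enumerate_cons, List.foldl_cons]
    have hm : PySem.Int.mod i 2 = i % 2 := PySem.Int.mod_eq_emod_of_pos (by omega)
    have hm1 : PySem.Int.mod (i + 1) 2 = (i + 1) % 2 := PySem.Int.mod_eq_emod_of_pos (by omega)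
    by_cases he : i % 2 = 0
    · have hstep : pvStepB2 acc (i, c) = acc ++ pvEmit (pvClean c) := by
        by_cases hc : pvClean c = [] <;> simp [pvStepB2, he, pvEmit, hc]
      rw [hstep, ih (i + 1) (by omega), hm1,
        if_neg (by omega : ¬ ((i + 1) % 2 = 0)), hm, if_pos he]
      simp [pvGIn', List.append_assoc]
    · have hstep : pvStepB2 acc (i, c) = acc := by
        simp [pvStepB2, he]
      rw [hstep, ih (i + 1) (by omega), hm1,
        if_pos (by omega : (i + 1) % 2 = 0), hm, if_neg he]
      simp [pvGEx']

-- ===== VERDICT (by name: the statement is the Claim_ definition above) =====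
theorem clean_and_group_data_spec : Claim_equal_clean_and_group_data := by
  intro input_data _
  show clean_and_group_data input_data = clean_and_group_data_alt input_data
  simp only [clean_and_group_data, clean_and_group_data_alt]
  rw [lemA, lemB1]
  cases hc : pvChunks ((PySem.Str.split? input_data "\n").getD []) with
  | nil => exact absurd hc (pvChunks_ne_nil _)
  | cons c cs =>
    rw [lemB2 _ 0 (by norm_num)]
    simp
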